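-- pv_equiv track=rewrite | github.com/grambank/pygrambank | src/pygrambank/commands/remove_empty.py | real_row_width
-- ===== SOURCE A (Python) =====
-- def real_row_width(row):
--     """Return width of a table row ignoring any empty cells at the end."""
--     last_index = None
--     for index, cell in enumerate(row):
--         if cell.strip():
--             last_index = index
--     if last_index is None:
--         return 0
--     else:
--         return last_index + 1
-- ===== SOURCE B (Python) =====
-- def real_row_width(row):
--     """Return width of a table row ignoring any empty cells at the end."""
--     for i in range(len(row) - 1, -1, -1):
--         if row[i].strip():
--             return i + 1
--     return 0
-- ===== Notes on version B (the rewrite author's own statement) =====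
-- stated objective: simpler
-- what changed: B scans the row backward and returns i+1 at the first non-blank cell (early exit), instead of A's full forward scan maintaining a last_index accumulator.
import Mathlib
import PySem

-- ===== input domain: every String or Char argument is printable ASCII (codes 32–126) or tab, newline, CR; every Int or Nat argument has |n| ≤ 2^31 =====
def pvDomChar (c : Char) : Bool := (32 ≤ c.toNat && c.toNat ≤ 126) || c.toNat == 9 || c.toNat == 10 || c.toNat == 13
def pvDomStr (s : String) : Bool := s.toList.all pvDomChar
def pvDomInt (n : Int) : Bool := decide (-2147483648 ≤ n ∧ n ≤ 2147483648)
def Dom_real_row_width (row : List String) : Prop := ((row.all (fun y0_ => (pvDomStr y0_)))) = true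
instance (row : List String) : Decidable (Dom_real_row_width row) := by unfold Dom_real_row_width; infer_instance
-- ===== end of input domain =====

-- B scans the row backward and returns at the first non-blank cell, instead of
-- A's forward scan tracking last_index (objective: simpler).


-- ===== PORT A =====
-- forward scan: last_index := index of the last cell whose strip() is truthy
def real_row_width (row : List String) : Int :=
  let last_index : Option Int :=
    (PySem.List.enumerate row).foldl
      (fun acc p => if PySem.Str.strip p.2 ≠ "" then some p.1 else acc)
      none
  match last_index with
  | none => 0
  | some i => i + 1

-- ===== PORT B =====
-- backward scan with early exit, realised as recursion on the reversed row:
-- at the first (from the end) non-blank cell c with `rest` cells before it,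
-- the original index is rest.length, so the width is rest.length + 1.
def realRowWidthRev : List String → Int
  | [] => 0
  | c :: rest =>
      if PySem.Str.strip c ≠ "" then (rest.length : Int) + 1
      else realRowWidthRev rest

def real_row_width_alt (row : List String) : Int :=
  realRowWidthRev row.reverse

-- ===== PRECONDITION & SPEC =====
def Spec_real_row_width (row : List String) (out : Int) : Prop := out = real_row_width_alt row
instance (row : List String) (out : Int) : Decidable (Spec_real_row_width row out) := by unfold Spec_real_row_width; infer_instance

-- ===== CLAIM (what is proved, stated in full; the proofs are below) =====
def Claim_equal_real_row_width : Prop := ∀ (row : List String), Dom_real_row_width row → Spec_real_row_width row (real_row_width row)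

-- ===== LEMMAS AND PROOFS =====

theorem real_row_width_eq_alt (row : List String) :
    real_row_width row = real_row_width_alt row := by
  induction row using List.reverseRecOn with
  | nil => rfl
  | append_singleton xs x ih =>
      simp only [real_row_width, real_row_width_alt, PySem.List.enumerate_append,
        List.foldl_append, List.reverse_append,
        List.reverse_cons, List.reverse_nil, List.nil_append, List.cons_append,
        realRowWidthRev] at ih ⊢
      by_cases h : PySem.Str.strip x = ""
      · simpa [h, PySem.List.enumerate_nil] using ih
      · simp [h, PySem.List.enumerate_nil]

-- ===== VERDICT (by name: the statement is the Claim_ definition above) =====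
theorem real_row_width_spec : Claim_equal_real_row_width := by
  intro row _
  exact real_row_width_eq_alt row
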